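-- pv_equiv track=rewrite | github.com/indicwiki-iiit/MCD_Backend | src/utils/utils.py | remove_extra_spaces_in_dictionary
-- ===== SOURCE A (Python) =====
-- def remove_extra_spaces_in_dictionary(src_dict: dict, valid_keys: list = [],
--                                       exclude_empty_fields=False):
--     res = {}
--     empty_fields = []
--     for k, v in src_dict.items():
--         if k in valid_keys:
--             if not isinstance(v, str):
--                 res[k] = v
--                 continue
--             temp = v.strip()
--             if len(temp) == 0 or temp == '':
--                 empty_fields.append(k)
--                 if exclude_empty_fields:
--                     continue
--             res[k] = v.strip()
--         else:
--             res[k] = v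
--     return res, empty_fields
-- ===== SOURCE B (Python) =====
-- def remove_extra_spaces_in_dictionary(src_dict: dict, valid_keys: list = [],
--                                       exclude_empty_fields=False):
--     valid = set(valid_keys)
--     # pass 1: which keys hold an empty (after strip) string value under a valid key
--     empty_fields = [k for k, v in src_dict.items()
--                     if k in valid and isinstance(v, str) and v.strip() == '']
--     empty = set(empty_fields)
--     # pass 2: build the result, stripping string values of valid keys,
--     # dropping the precomputed empty fields when asked to
--     res = {k: (v.strip() if k in valid and isinstance(v, str) else v)
--            for k, v in src_dict.items()
--            if not (exclude_empty_fields and k in empty)}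
--     return res, empty_fields
-- ===== Notes on version B (the rewrite author's own statement) =====
-- stated objective: faster
-- what changed: B replaces A's single stateful loop (mutating a result dict, an empty-fields list, and continue-driven control flow, with a linear 'k in valid_keys' list scan per item) by two independent passes built from a precomputed valid-keys set: a comprehension collecting the empty valid-key fields first, then a dict comprehension building the stripped result, skipping keys found in the precomputed empty set; set membership removes A's inner list scan.
import Mathlib
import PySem

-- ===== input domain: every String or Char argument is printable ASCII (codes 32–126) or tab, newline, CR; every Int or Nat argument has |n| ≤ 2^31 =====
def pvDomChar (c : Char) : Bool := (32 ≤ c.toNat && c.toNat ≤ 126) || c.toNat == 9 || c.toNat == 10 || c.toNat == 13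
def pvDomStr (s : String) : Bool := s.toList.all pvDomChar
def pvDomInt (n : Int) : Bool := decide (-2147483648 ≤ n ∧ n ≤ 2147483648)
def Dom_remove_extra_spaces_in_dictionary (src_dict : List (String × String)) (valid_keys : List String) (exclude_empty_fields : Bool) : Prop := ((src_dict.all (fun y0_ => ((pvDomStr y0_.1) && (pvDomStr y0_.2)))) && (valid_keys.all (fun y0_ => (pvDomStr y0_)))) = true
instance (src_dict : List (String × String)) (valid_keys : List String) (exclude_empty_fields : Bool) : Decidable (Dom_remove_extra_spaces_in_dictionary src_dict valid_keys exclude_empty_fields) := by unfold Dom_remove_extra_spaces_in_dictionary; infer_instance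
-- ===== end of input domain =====

-- B separates the work into two independent passes (collect empty valid-key fields, then build the stripped
-- result as a comprehension) over a precomputed valid-keys set, instead of A's single loop mutating a dict and a
-- list with a linear valid_keys scan per item (objective: faster, measured).

-- ===== PORT A =====
-- the for-loop of A, state = (res, empty_fields); branches in A's order
def pvALoop (valid_keys : List String) (exclude_empty_fields : Bool) :
    List (String × String) → PySem.Dict String String → List String →
    PySem.Dict String String × List String
  | [], res, empty_fields => (res, empty_fields)
  | (k, v) :: rest, res, empty_fields =>
    if valid_keys.contains k then
      let temp := PySem.Str.strip v
      if PySem.Str.len temp == 0 || temp == "" then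
        if exclude_empty_fields then
          pvALoop valid_keys exclude_empty_fields rest res (empty_fields ++ [k])
        else
          pvALoop valid_keys exclude_empty_fields rest
            (res.insert k (PySem.Str.strip v)) (empty_fields ++ [k])
      else
        pvALoop valid_keys exclude_empty_fields rest
          (res.insert k (PySem.Str.strip v)) empty_fields
    else
      pvALoop valid_keys exclude_empty_fields rest (res.insert k v) empty_fields

def remove_extra_spaces_in_dictionary (src_dict : List (String × String)) (valid_keys : List String) (exclude_empty_fields : Bool) : (List (String × String)) × List String :=
  let st := pvALoop valid_keys exclude_empty_fields src_dict PySem.Dict.empty []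
  (st.1.items, st.2)

-- ===== PORT B =====
def remove_extra_spaces_in_dictionary_alt (src_dict : List (String × String)) (valid_keys : List String) (exclude_empty_fields : Bool) : (List (String × String)) × List String :=
  let valid : PySem.Set String := PySem.Set.ofList valid_keys
  let empty_fields :=
    (src_dict.filter (fun kv => PySem.Set.contains valid kv.1 && PySem.Str.strip kv.2 == "")).map Prod.fst
  let empty : PySem.Set String := PySem.Set.ofList empty_fields
  let res :=
    (src_dict.filter (fun kv => !(exclude_empty_fields && PySem.Set.contains empty kv.1))).map
      (fun kv => (kv.1, if PySem.Set.contains valid kv.1 then PySem.Str.strip kv.2 else kv.2))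
  (res, empty_fields)

-- ===== PRECONDITION & SPEC =====
-- Pre_ excludes association lists with duplicate keys: they do not represent any Python dict
-- (src_dict is a dict, whose keys are necessarily distinct), so A is never called on them.
def Pre_remove_extra_spaces_in_dictionary (src_dict : List (String × String)) (valid_keys : List String) (exclude_empty_fields : Bool) : Prop :=
  (src_dict.map Prod.fst).Nodup
instance (src_dict : List (String × String)) (valid_keys : List String) (exclude_empty_fields : Bool) : Decidable (Pre_remove_extra_spaces_in_dictionary src_dict valid_keys exclude_empty_fields) := by unfold Pre_remove_extra_spaces_in_dictionary; infer_instance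

def pvWitness_remove_extra_spaces_in_dictionary : (List (String × String)) × List String × Bool :=
  ([("a", " b "), ("c", "  "), ("d", "x")], ["a", "c"], true)

def Spec_remove_extra_spaces_in_dictionary (src_dict : List (String × String)) (valid_keys : List String) (exclude_empty_fields : Bool) (out : (List (String × String)) × List String) : Prop := out = remove_extra_spaces_in_dictionary_alt src_dict valid_keys exclude_empty_fields
instance (src_dict : List (String × String)) (valid_keys : List String) (exclude_empty_fields : Bool) (out : (List (String × String)) × List String) : Decidable (Spec_remove_extra_spaces_in_dictionary src_dict valid_keys exclude_empty_fields out) := by unfold Spec_remove_extra_spaces_in_dictionary; infer_instance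

-- ===== CLAIM (what is proved, stated in full; the proofs are below) =====
def Claim_equal_remove_extra_spaces_in_dictionary : Prop := ∀ (src_dict : List (String × String)) (valid_keys : List String) (exclude_empty_fields : Bool), Dom_remove_extra_spaces_in_dictionary src_dict valid_keys exclude_empty_fields → Pre_remove_extra_spaces_in_dictionary src_dict valid_keys exclude_empty_fields → Spec_remove_extra_spaces_in_dictionary src_dict valid_keys exclude_empty_fields (remove_extra_spaces_in_dictionary src_dict valid_keys exclude_empty_fields)

-- ===== LEMMAS AND PROOFS =====

-- membership in set(valid_keys) is membership in valid_keys
theorem pvContains_ofList (valid_keys : List String) (k : String) :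
    PySem.Set.contains (PySem.Set.ofList valid_keys) k = valid_keys.contains k := by
  rw [Bool.eq_iff_iff, PySem.Set.contains_iff, PySem.Set.mem_ofList]
  simp

-- A's loop, on fresh distinct keys, appends the locally-decided entries to its accumulators.
theorem pvALoop_eq (valid_keys : List String) (exclude_empty_fields : Bool) :
    ∀ (src : List (String × String)) (res : PySem.Dict String String) (acc : List String),
      (∀ kv ∈ src, res.contains kv.1 = false) →
      (src.map Prod.fst).Nodup →
      pvALoop valid_keys exclude_empty_fields src res acc =
        (PySem.Dict.mk (res.items ++
          ((src.filter (fun kv => !(exclude_empty_fields && (valid_keys.contains kv.1 && PySem.Str.strip kv.2 == "")))).map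
            (fun kv => (kv.1, if valid_keys.contains kv.1 then PySem.Str.strip kv.2 else kv.2)))),
         acc ++ (src.filter (fun kv => valid_keys.contains kv.1 && PySem.Str.strip kv.2 == "")).map Prod.fst) := by
  intro src
  induction src with
  | nil => intro res acc _ _; simp [pvALoop]
  | cons kv rest ih =>
    intro res acc hfresh hnd
    obtain ⟨k, v⟩ := kv
    have hfk : res.contains k = false := hfresh (k, v) (by simp)
    have hnd' : (rest.map Prod.fst).Nodup := (List.nodup_cons.mp (by simpa using hnd)).2
    have hknotin : k ∉ rest.map Prod.fst := (List.nodup_cons.mp (by simpa using hnd)).1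
    have hfreshIns : ∀ (w : String), ∀ kv ∈ rest, (res.insert k w).contains kv.1 = false := by
      intro w kv hkv
      rw [PySem.Dict.contains_insert]
      have h1 : res.contains kv.1 = false := hfresh kv (by simp [hkv])
      have h2 : (kv.1 == k) = false := by
        simp only [beq_eq_false_iff_ne]
        intro he; exact hknotin (he ▸ List.mem_map_of_mem hkv)
      simp [h1, h2]
    by_cases hval : valid_keys.contains k
    · have hval' : k ∈ valid_keys := by simpa using hval
      by_cases hemp : PySem.Str.strip v = ""
      · have hlen : (PySem.Str.len (PySem.Str.strip v) == 0 || PySem.Str.strip v == "") = true := by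
          simp [hemp]
        by_cases hex : exclude_empty_fields = true
        · simp only [pvALoop, hval, if_true, hlen, if_pos hex]
          rw [ih res (acc ++ [k]) (fun kv hkv => hfresh kv (by simp [hkv])) hnd']
          simp [List.filter_cons, hval', hemp, hex]
        · simp only [pvALoop, hval, if_true, hlen, if_neg hex]
          rw [ih _ (acc ++ [k]) (hfreshIns _) hnd']
          rw [PySem.Dict.items_insert_of_not_contains _ _ hfk]
          simp only [Bool.not_eq_true] at hex
          simp [List.filter_cons, hval', hemp, hex]
      · have hlen : (PySem.Str.len (PySem.Str.strip v) == 0 || PySem.Str.strip v == "") = false := by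
          have hne : ¬ PySem.Chars.strip v.toList = [] := by
            intro h
            exact hemp (by rw [← PySem.Str.toList_strip] at h; exact String.toList_eq_nil_iff.mp h)
          simp [PySem.Str.len, hemp, String.length_eq_zero_iff, hne]
        simp only [pvALoop, hval, if_true, hlen, Bool.false_eq_true, if_false]
        rw [ih _ acc (hfreshIns _) hnd']
        rw [PySem.Dict.items_insert_of_not_contains _ _ hfk]
        simp [List.filter_cons, hval', hemp]
    · have hval' : k ∉ valid_keys := by simpa using hval
      simp only [pvALoop, hval, Bool.false_eq_true, if_false]
      rw [ih _ acc (hfreshIns _) hnd']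
      rw [PySem.Dict.items_insert_of_not_contains _ _ hfk]
      simp [hval']

-- under distinct keys, membership of kv.1 in B's precomputed empty set is the local test on kv itself
theorem empty_contains_local (src : List (String × String)) (valid_keys : List String)
    (hnd : (src.map Prod.fst).Nodup) (kv : String × String) (hkv : kv ∈ src) :
    ((src.filter (fun kv => valid_keys.contains kv.1 && PySem.Str.strip kv.2 == "")).map Prod.fst).contains kv.1
      = (valid_keys.contains kv.1 && PySem.Str.strip kv.2 == "") := by
  have hmem : kv.1 ∈ (src.filter (fun kv => valid_keys.contains kv.1 && PySem.Str.strip kv.2 == "")).map Prod.fst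
      ↔ (valid_keys.contains kv.1 && PySem.Str.strip kv.2 == "") = true := by
    constructor
    · intro h
      obtain ⟨kv', hkv', heq⟩ := List.mem_map.mp h
      have hkv'mem := (List.mem_filter.mp hkv').1
      have hpred := (List.mem_filter.mp hkv').2
      have heqp : kv' = kv := List.inj_on_of_nodup_map hnd hkv'mem hkv heq
      rw [← heqp]; exact hpred
    · intro h
      exact List.mem_map_of_mem (List.mem_filter.mpr ⟨hkv, h⟩)
  rw [Bool.eq_iff_iff, List.contains_iff_mem]
  exact hmem

-- the two filter predicates of B and of pvALoop_eq agree pointwise on src_dict (given distinct keys)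
theorem filters_eq (src_dict : List (String × String)) (valid_keys : List String)
    (exclude_empty_fields : Bool) (hnd : (src_dict.map Prod.fst).Nodup) :
    src_dict.filter (fun kv => !(exclude_empty_fields &&
        ((src_dict.filter (fun kv => valid_keys.contains kv.1 && PySem.Str.strip kv.2 == "")).map Prod.fst).contains kv.1))
      = src_dict.filter (fun kv => !(exclude_empty_fields && (valid_keys.contains kv.1 && PySem.Str.strip kv.2 == ""))) := by
  apply List.filter_congr
  intro kv hkv
  rw [empty_contains_local src_dict valid_keys hnd kv hkv]

-- ===== VERDICT (by name: the statement is the Claim_ definition above) =====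
theorem remove_extra_spaces_in_dictionary_spec : Claim_equal_remove_extra_spaces_in_dictionary := by
  intro src_dict valid_keys exclude_empty_fields _hdom hpre
  unfold Spec_remove_extra_spaces_in_dictionary
  unfold remove_extra_spaces_in_dictionary remove_extra_spaces_in_dictionary_alt
  dsimp only
  simp only [pvContains_ofList]
  rw [pvALoop_eq valid_keys exclude_empty_fields src_dict PySem.Dict.empty []
      (by intro kv _; simp [PySem.Dict.contains_empty]) hpre]
  rw [filters_eq src_dict valid_keys exclude_empty_fields hpre]
  simp [PySem.Dict.empty]
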